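-- pv_equiv track=rewrite | github.com/sballari/AlgGrafi | LAB3/primMST.py | pi2Tree
-- ===== SOURCE A (Python) =====
-- def pi2Tree(piMap):
--     #desc: converte la mappa dei predecessori in un albero classico
--     #piMap : mappa dei padri di ogni nodo
--     #return : mappa dei successori
--     if len(piMap) == 0 : return None
--     else:
--         if len(piMap) == 1  :
--             el,padre = piMap.popitem()
--             return {padre: [el]}
--         else:
--             el,padre = piMap.popitem()
--             tree = pi2Tree(piMap)
--             if padre in tree : tree[padre].append(el)
--             else: tree[padre]=[el]
--             return tree
-- ===== SOURCE B (Python) =====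
-- def pi2Tree(piMap):
--     # iterative: one forward pass with setdefault; clears piMap like A's popitem loop empties it
--     if not piMap:
--         return None
--     tree = {}
--     for el, padre in list(piMap.items()):
--         tree.setdefault(padre, []).append(el)
--     piMap.clear()
--     return tree
-- ===== Notes on version B (the rewrite author's own statement) =====
-- stated objective: simpler
-- what changed: Replaced the popitem-based recursion (one Python frame per entry, building the tree bottom-up) by a single forward loop with dict.setdefault, which yields the same insertion and child-list order.
import Mathlib
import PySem

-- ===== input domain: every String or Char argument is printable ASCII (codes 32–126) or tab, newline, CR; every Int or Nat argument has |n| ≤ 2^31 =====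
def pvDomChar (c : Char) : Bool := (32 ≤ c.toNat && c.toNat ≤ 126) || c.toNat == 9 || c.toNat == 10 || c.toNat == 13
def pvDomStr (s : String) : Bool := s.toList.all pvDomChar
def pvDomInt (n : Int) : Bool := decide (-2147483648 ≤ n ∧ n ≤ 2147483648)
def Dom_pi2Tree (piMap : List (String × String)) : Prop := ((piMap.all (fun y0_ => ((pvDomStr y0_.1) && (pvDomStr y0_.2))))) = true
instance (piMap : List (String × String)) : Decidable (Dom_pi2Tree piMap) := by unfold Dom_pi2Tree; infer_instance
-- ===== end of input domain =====

-- B replaces A's popitem recursion by one forward setdefault loop; equivalence is about the RETURN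
-- value only (A empties piMap via popitem, B via clear() — the same observable mutation in Python).

-- ===== PORT A =====
-- A pops the LAST item and recurses on the rest: we recurse structurally on the reversed list,
-- whose head is exactly the pair popitem() returns at each level.
def pi2TreeGoA : List (String × String) → Option (PySem.Dict String (List String))
  | [] => none
  | (el, padre) :: rest =>
    match rest with
    | [] => some (PySem.Dict.empty.insert padre [el])
    | _ :: _ =>
      match pi2TreeGoA rest with
      | none => none  -- unreachable: rest ≠ []
      | some tree =>
        some (if tree.contains padre then tree.modify padre [] (· ++ [el])
              else tree.insert padre [el])

def pi2Tree (piMap : List (String × String)) : Option (List (String × List String)) :=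
  (pi2TreeGoA piMap.reverse).map (fun d => d.items)

-- ===== PORT B =====
def pi2Tree_alt (piMap : List (String × String)) : Option (List (String × List String)) :=
  if piMap.isEmpty then none
  else
    -- tree.setdefault(padre, []).append(el)  ==  tree[padre] = tree.get(padre, []) + [el]
    some ((piMap.foldl (fun tree ep => tree.modify ep.2 [] (· ++ [ep.1])) PySem.Dict.empty).items)

-- ===== PRECONDITION & SPEC =====
def Spec_pi2Tree (piMap : List (String × String)) (out : Option (List (String × List String))) : Prop := out = pi2Tree_alt piMap
instance (piMap : List (String × String)) (out : Option (List (String × List String))) : Decidable (Spec_pi2Tree piMap out) := by unfold Spec_pi2Tree; infer_instance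

-- ===== CLAIM (what is proved, stated in full; the proofs are below) =====
def Claim_equal_pi2Tree : Prop := ∀ (piMap : List (String × String)), Dom_pi2Tree piMap → Spec_pi2Tree piMap (pi2Tree piMap)

-- ===== LEMMAS AND PROOFS =====

-- A's branch (append if present, insert if absent) is exactly B's single modify step.
theorem stepA_eq_modify (tree : PySem.Dict String (List String)) (el padre : String) :
    (if tree.contains padre then tree.modify padre [] (· ++ [el]) else tree.insert padre [el]) =
      tree.modify padre [] (· ++ [el]) := by
  by_cases h : tree.contains padre = true
  · simp [h]
  · simp only [h, PySem.Dict.modify]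
    rw [PySem.Dict.getD_of_not_contains tree [] (by simpa using h)]
    simp

theorem goA_eq_foldl (ys : List (String × String)) (h : ys ≠ []) :
    pi2TreeGoA ys =
      some (ys.reverse.foldl (fun tree ep => tree.modify ep.2 [] (· ++ [ep.1])) PySem.Dict.empty) := by
  induction ys with
  | nil => exact absurd rfl h
  | cons p rest ih =>
    obtain ⟨el, padre⟩ := p
    cases hr : rest with
    | nil => simp [pi2TreeGoA, PySem.Dict.modify]
    | cons q rs =>
      rw [← hr]
      have hrne : rest ≠ [] := by simp [hr]
      show pi2TreeGoA ((el, padre) :: rest) = _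
      unfold pi2TreeGoA
      rw [hr, ← hr, ih hrne]
      rw [hr]
      simp only [stepA_eq_modify, List.reverse_cons, List.foldl_append, List.foldl_cons,
        List.foldl_nil]

-- ===== VERDICT (by name: the statement is the Claim_ definition above) =====
theorem pi2Tree_spec : Claim_equal_pi2Tree := by
  intro piMap _
  unfold Spec_pi2Tree pi2Tree pi2Tree_alt
  cases hp : piMap with
  | nil => rfl
  | cons x xs =>
    rw [goA_eq_foldl _ (by simp)]
    simp
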